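-- pv_equiv track=rewrite | github.com/hzeemr/crimsonforge | core/paa_link_resolver.py | normalise_link_target
-- ===== SOURCE A (Python) =====
-- def normalise_link_target(raw: str) -> str:
--     """Turn a raw ``%character/...`` token into a clean relative path.
--
--     Strips the ``%`` prefix + any embedded trailing null / garbage.
--     Returns the normalised path as a lowercase archive path.
--     """
--     s = raw
--     if s.startswith("%"):
--         s = s[1:]
--     # Trim at first non-path character (null, CR/LF, etc.)
--     end = len(s)
--     for i, ch in enumerate(s):
--         if ch in ("\x00", "\r", "\n") or ord(ch) < 0x20:
--             end = i
--             break
--     return s[:end].lower().replace("\\", "/")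
-- ===== SOURCE B (Python) =====
-- def normalise_link_target(raw: str) -> str:
--     """Turn a raw ``%character/...`` token into a clean relative path.
--
--     Different decomposition: instead of an index-tracking scan for the first
--     control character, map every control character (< 0x20) to NUL via
--     str.translate and keep everything before the first NUL with one split.
--     """
--     s = raw.removeprefix("%")
--     s = s.translate({i: "\x00" for i in range(0x20)}).split("\x00", 1)[0]
--     return s.lower().replace("\\", "/")
-- ===== Notes on version B (the rewrite author's own statement) =====
-- stated objective: faster
-- what changed: Replaces the manual enumerate loop that tracks the cut index with a translate-all-control-chars-to-NUL pass followed by a single split at the first NUL (and str.removeprefix for the % strip).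
import Mathlib
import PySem

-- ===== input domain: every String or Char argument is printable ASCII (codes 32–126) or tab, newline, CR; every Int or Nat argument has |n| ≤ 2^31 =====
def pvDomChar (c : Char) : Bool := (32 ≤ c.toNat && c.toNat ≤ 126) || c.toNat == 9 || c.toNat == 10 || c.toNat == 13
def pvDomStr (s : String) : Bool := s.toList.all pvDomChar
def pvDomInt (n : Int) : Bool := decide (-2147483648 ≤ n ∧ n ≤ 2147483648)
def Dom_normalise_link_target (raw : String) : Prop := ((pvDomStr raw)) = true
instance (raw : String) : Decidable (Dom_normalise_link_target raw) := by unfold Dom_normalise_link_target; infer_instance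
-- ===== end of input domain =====

-- B replaces A's index-tracking first-control-character scan by a map-control-chars-to-NUL
-- pass followed by a cut at the first NUL (same O(n), measured faster by a constant factor).

-- ===== PORT A =====
-- the 'for i, ch in enumerate(s): if <ctrl>: end = i; break' loop: carries the running
-- index and the default end (= len s), returns at the first control character
def pvFindEndA : List Char → Nat → Nat → Nat
  | [], _, e => e
  | ch :: rest, i, e =>
      if ch = '\x00' ∨ ch = '\x0d' ∨ ch = '\x0a' ∨ ch.toNat < 0x20 then i
      else pvFindEndA rest (i + 1) e

def normalise_link_target (raw : String) : String :=
  let s := if PySem.Str.startswith raw "%" then PySem.Str.slice raw (some 1) none else raw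
  let e := pvFindEndA s.toList 0 s.toList.length
  PySem.Str.replace (PySem.Str.lower (PySem.Str.slice s none (some (e : Int)))) "\\" "/"

-- ===== PORT B =====
-- s.translate({i: "\x00" for i in range(0x20)}): map each control char (< 0x20) to NUL
def pvToNul (c : Char) : Char := if c.toNat < 0x20 then '\x00' else c

def normalise_link_target_alt (raw : String) : String :=
  -- raw.removeprefix("%")
  let s := if PySem.Str.startswith raw "%" then String.ofList raw.toList.tail else raw
  -- translate, then split("\x00", 1)[0] = everything before the first NUL
  let t := s.toList.map pvToNul
  let s := String.ofList (t.takeWhile (fun c => c ≠ '\x00'))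
  PySem.Str.replace (PySem.Str.lower s) "\\" "/"

-- ===== PRECONDITION & SPEC =====
def Spec_normalise_link_target (raw : String) (out : String) : Prop := out = normalise_link_target_alt raw
instance (raw : String) (out : String) : Decidable (Spec_normalise_link_target raw out) := by unfold Spec_normalise_link_target; infer_instance

-- ===== CLAIM (what is proved, stated in full; the proofs are below) =====
def Claim_equal_normalise_link_target : Prop := ∀ (raw : String), Dom_normalise_link_target raw → Spec_normalise_link_target raw (normalise_link_target raw)

-- ===== LEMMAS AND PROOFS =====

-- shifting the running index of A's loop by one shifts the result by one
lemma pvFindEndA_shift (l : List Char) (i e : Nat) :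
    pvFindEndA l (i + 1) (e + 1) = pvFindEndA l i e + 1 := by
  induction l generalizing i with
  | nil => simp [pvFindEndA]
  | cons c cs ih =>
      by_cases h : c = '\x00' ∨ c = '\x0d' ∨ c = '\x0a' ∨ c.toNat < 0x20
      · simp [pvFindEndA, h]
      · simp [pvFindEndA, h, ih]

-- A's prefix-up-to-first-control-char equals B's takeWhile over the NUL-mapped list
lemma take_findEndA (l : List Char) :
    l.take (pvFindEndA l 0 l.length) = (l.map pvToNul).takeWhile (fun c => c ≠ '\x00') := by
  induction l with
  | nil => simp [pvFindEndA]
  | cons c cs ih =>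
      by_cases h : c.toNat < 0x20
      · have h' : c = '\x00' ∨ c = '\x0d' ∨ c = '\x0a' ∨ c.toNat < 0x20 := Or.inr (Or.inr (Or.inr h))
        simp [pvFindEndA, pvToNul, h]
      · have h13 : c ≠ '\x0d' := by rintro rfl; exact h (by decide)
        have h10 : c ≠ '\x0a' := by rintro rfl; exact h (by decide)
        have hnul : c ≠ '\x00' := by rintro rfl; exact h (by decide)
        have hstep : pvFindEndA cs 1 (cs.length + 1) = pvFindEndA cs 0 cs.length + 1 :=
          pvFindEndA_shift cs 0 cs.length
        simp [pvFindEndA, h, h13, h10, hnul, List.length_cons, hstep, pvToNul, ih]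

-- the common tail of both ports, for an arbitrary (already %-stripped) string
lemma pv_tail_eq (s : String) :
    PySem.Str.replace (PySem.Str.lower (PySem.Str.slice s none
        (some ((pvFindEndA s.toList 0 s.toList.length : Nat) : Int)))) "\\" "/" =
    PySem.Str.replace (PySem.Str.lower (String.ofList
        ((s.toList.map pvToNul).takeWhile (fun c => c ≠ '\x00')))) "\\" "/" := by
  apply congrArg (fun x => PySem.Str.replace x "\\" "/")
  apply congrArg PySem.Str.lower
  apply String.toList_inj.mp
  rw [String.toList_ofList]
  simp only [PySem.Str.toList_slice, PySem.Chars.slice_eq_listSlice, PySem.List.slice_to_natCast]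
  exact take_findEndA s.toList

-- the two ports agree
lemma ports_agree (raw : String) : normalise_link_target raw = normalise_link_target_alt raw := by
  unfold normalise_link_target normalise_link_target_alt
  by_cases hp : PySem.Str.startswith raw "%"
  · have hs : PySem.Str.slice raw (some 1) none = String.ofList raw.toList.tail := by
      apply String.toList_inj.mp
      simp [PySem.Str.toList_slice, PySem.List.slice_from_one]
    simp only [hp, if_true]
    rw [hs]
    exact pv_tail_eq _
  · simp only [hp, Bool.false_eq_true, if_false]
    exact pv_tail_eq _

-- ===== VERDICT (by name: the statement is the Claim_ definition above) =====
theorem normalise_link_target_spec : Claim_equal_normalise_link_target := by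
  intro raw _
  exact ports_agree raw
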